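-- pv_equiv track=rewrite | github.com/biancofla/advent-of-code-2022 | day_9/solution.py | _check_adjacency
-- ===== SOURCE A (Python) =====
-- def _check_adjacency(position_1, position_2):
--     """
--         Check if two positions are adjacent.
--
--         Args
--             * position_1 (list): first position.
--             * position_2 (list): second position.
--
--         Returns:
--             * (bool): True, if the the two positions
--             are ajacent; False, otherwise.
--     """
--     adjacency_positions = [
--         # Same position.
--         position_2,
--         # Left.
--         [position_2[0] - 1, position_2[1]],
--         # Top.
--         [position_2[0], position_2[1] + 1],
--         # Right.
--         [position_2[0] + 1, position_2[1]],
--         # Bottom.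
--         [position_2[0], position_2[1] - 1],
--         # Top-Left.
--         [position_2[0] - 1, position_2[1] + 1],
--         # Top-Right.
--         [position_2[0] + 1, position_2[1] + 1],
--         # Bottom-Left.
--         [position_2[0] - 1, position_2[1] - 1],
--         # Bottom-Right.
--         [position_2[0] + 1, position_2[1] - 1],
--     ]
--     for ap in adjacency_positions:
--         if (
--             position_1[0] == ap[0] and
--             position_1[1] == ap[1]
--         ):
--             return True
--     return False
-- ===== SOURCE B (Python) =====
-- def _check_adjacency(position_1, position_2):
--     return (
--         (position_1[0] == position_2[0] or
--          position_1[0] == position_2[0] - 1 or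
--          position_1[0] == position_2[0] + 1) and
--         (position_1[1] == position_2[1] or
--          position_1[1] == position_2[1] - 1 or
--          position_1[1] == position_2[1] + 1)
--     )
-- ===== Notes on version B (the rewrite author's own statement) =====
-- stated objective: simpler
-- what changed: Replaces the 9-candidate neighbour list and its scan loop by two independent per-coordinate three-way equality tests, one per axis.
import Mathlib
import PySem

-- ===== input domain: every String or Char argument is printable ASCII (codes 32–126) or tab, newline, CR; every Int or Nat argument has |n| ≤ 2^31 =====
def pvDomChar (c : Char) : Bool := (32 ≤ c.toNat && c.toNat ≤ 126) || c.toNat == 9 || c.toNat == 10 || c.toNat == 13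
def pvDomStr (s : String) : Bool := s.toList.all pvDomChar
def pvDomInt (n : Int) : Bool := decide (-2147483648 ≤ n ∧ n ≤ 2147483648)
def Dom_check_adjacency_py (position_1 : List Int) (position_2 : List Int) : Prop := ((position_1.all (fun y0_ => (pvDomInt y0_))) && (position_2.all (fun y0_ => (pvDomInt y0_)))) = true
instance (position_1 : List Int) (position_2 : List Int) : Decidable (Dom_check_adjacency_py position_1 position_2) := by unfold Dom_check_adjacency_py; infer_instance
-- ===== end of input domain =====

-- B replaces A's 9-candidate neighbour list and scan loop by two per-axis three-way equality tests (objective: simpler).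

-- ===== PORT A =====
-- Literal port of A: build the list of 9 adjacent positions, then scan for the first match.
-- Indexing position_2[0]/[1] (building the list) and position_1[0]/[1] (the loop test) is via pyGet?;
-- none (Python IndexError) is excluded by Pre_.
def check_adjacency_py (position_1 : List Int) (position_2 : List Int) : Bool :=
  match PySem.List.pyGet? position_2 0, PySem.List.pyGet? position_2 1 with
  | some x, some y =>
    let adjacency_positions : List (List Int) :=
      [ position_2,
        [x - 1, y], [x, y + 1], [x + 1, y], [x, y - 1],
        [x - 1, y + 1], [x + 1, y + 1], [x - 1, y - 1], [x + 1, y - 1] ]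
    adjacency_positions.any (fun ap =>
      match PySem.List.pyGet? position_1 0, PySem.List.pyGet? ap 0,
            PySem.List.pyGet? position_1 1, PySem.List.pyGet? ap 1 with
      | some a, some u, some b, some v => a == u && b == v
      | _, _, _, _ => false)
  | _, _ => false

-- ===== PORT B =====
-- Literal port of B: axis-wise three-way equality checks, no candidate list.
-- One helper per axis; indexing via pyGet? (none = Python IndexError, excluded by Pre_),
-- threaded with Option.bind/map so a missing element yields false only outside Pre_.
def pvAxisNear (u : Option Int) (v : Option Int) : Bool :=
  ((u.bind fun a => v.map fun x => (a == x || a == x - 1 || a == x + 1))).getD false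

def check_adjacency_py_alt (position_1 : List Int) (position_2 : List Int) : Bool :=
  pvAxisNear (PySem.List.pyGet? position_1 0) (PySem.List.pyGet? position_2 0) &&
  pvAxisNear (PySem.List.pyGet? position_1 1) (PySem.List.pyGet? position_2 1)

-- ===== PRECONDITION & SPEC =====
-- Pre_ excludes exactly the inputs where Python A raises IndexError (a list with fewer than 2 elements).
def Pre_check_adjacency_py (position_1 : List Int) (position_2 : List Int) : Prop :=
  2 ≤ position_1.length ∧ 2 ≤ position_2.length
instance (position_1 : List Int) (position_2 : List Int) : Decidable (Pre_check_adjacency_py position_1 position_2) := by unfold Pre_check_adjacency_py; infer_instance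
def pvWitness_check_adjacency_py : List Int × List Int := ([0, 1], [1, 1])

def Spec_check_adjacency_py (position_1 : List Int) (position_2 : List Int) (out : Bool) : Prop := out = check_adjacency_py_alt position_1 position_2
instance (position_1 : List Int) (position_2 : List Int) (out : Bool) : Decidable (Spec_check_adjacency_py position_1 position_2 out) := by unfold Spec_check_adjacency_py; infer_instance

-- ===== CLAIM (what is proved, stated in full; the proofs are below) =====
def Claim_equal_check_adjacency_py : Prop := ∀ (position_1 : List Int) (position_2 : List Int), Dom_check_adjacency_py position_1 position_2 → Pre_check_adjacency_py position_1 position_2 → Spec_check_adjacency_py position_1 position_2 (check_adjacency_py position_1 position_2)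

-- ===== LEMMAS AND PROOFS =====

-- ===== VERDICT (by name: the statement is the Claim_ definition above) =====
theorem check_adjacency_py_spec : Claim_equal_check_adjacency_py := by
  intro position_1 position_2 _ hpre
  obtain ⟨h1, h2⟩ := hpre
  obtain ⟨a, b, t1, h1'⟩ : ∃ a b t, position_1 = a :: b :: t := by
    match position_1, h1 with
    | a :: b :: t, _ => exact ⟨a, b, t, rfl⟩
  obtain ⟨x, y, t2, h2'⟩ : ∃ x y t, position_2 = x :: y :: t := by
    match position_2, h2 with
    | x :: y :: t, _ => exact ⟨x, y, t, rfl⟩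
  subst h1' h2'
  unfold Spec_check_adjacency_py check_adjacency_py check_adjacency_py_alt pvAxisNear
  simp only [PySem.List.pyGet?_zero_cons]
  simp [PySem.List.pyGet?, PySem.List.pyIdx?]
  rw [Bool.eq_iff_iff]
  simp only [Bool.or_eq_true, Bool.and_eq_true, beq_iff_eq]
  omega
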